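-- pv_equiv track=rewrite | github.com/ozgurgulerx/startup-investments | packages/analysis/src/automation/ainews_parser.py | _best_link
-- ===== SOURCE A (Python) =====
-- from typing import Any, Dict, List, Optional
--
-- def _best_link(links: List[Dict[str, str]], fallback_url: str) -> str:
--     """Pick the best URL from extracted links, preferring external sources."""
--     for link in links:
--         href = link.get("href", "")
--         if not href or href.startswith("#"):
--             continue
--         # Prefer twitter, reddit, github links over newsletter internal links
--         if any(d in href for d in ("twitter.com", "x.com", "reddit.com", "github.com", "arxiv.org")):
--             return href
--     # Fall back to first non-empty link
--     for link in links:
--         href = link.get("href", "")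
--         if href and not href.startswith("#"):
--             return href
--     return fallback_url
-- ===== SOURCE B (Python) =====
-- _PREFERRED = ("twitter.com", "x.com", "reddit.com", "github.com", "arxiv.org")
--
-- def _best_link(links, fallback_url):
--     """Single pass: return first preferred link; remember first valid link as fallback."""
--     fallback = None
--     for link in links:
--         href = link.get("href", "")
--         if not href or href.startswith("#"):
--             continue
--         if any(d in href for d in _PREFERRED):
--             return href
--         if fallback is None:
--             fallback = href
--     return fallback if fallback is not None else fallback_url
-- ===== Notes on version B (the rewrite author's own statement) =====
-- stated objective: simpler
-- what changed: Replaced A's two sequential scans (first for preferred-domain links, then again for any valid link) with a single pass that returns the first preferred link immediately and tracks the first valid link in a fallback variable.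
import Mathlib
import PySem

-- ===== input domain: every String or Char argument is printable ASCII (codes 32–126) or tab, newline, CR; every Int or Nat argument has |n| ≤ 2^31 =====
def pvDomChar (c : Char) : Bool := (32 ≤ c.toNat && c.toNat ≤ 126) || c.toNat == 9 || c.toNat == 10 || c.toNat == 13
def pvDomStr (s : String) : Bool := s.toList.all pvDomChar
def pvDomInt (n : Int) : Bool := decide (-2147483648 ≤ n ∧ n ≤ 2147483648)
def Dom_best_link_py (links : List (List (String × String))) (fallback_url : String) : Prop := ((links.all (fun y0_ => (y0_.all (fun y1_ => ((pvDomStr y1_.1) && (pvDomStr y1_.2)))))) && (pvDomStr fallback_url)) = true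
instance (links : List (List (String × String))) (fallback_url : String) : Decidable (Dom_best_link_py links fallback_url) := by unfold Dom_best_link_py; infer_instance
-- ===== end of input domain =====

-- ===== PORT A =====
-- B collapses A's two scans into one pass with a fallback accumulator; return values proved equal.
def pvPreferred : List String := ["twitter.com", "x.com", "reddit.com", "github.com", "arxiv.org"]

-- href = link.get("href", "")
def pvHref (link : List (String × String)) : String :=
  PySem.Dict.getD (PySem.Dict.mk link) "href" ""

-- 'not href or href.startswith("#")'
def pvSkip (href : String) : Bool :=
  href == "" || PySem.Str.startswith href "#"

-- 'any(d in href for d in (...))'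
def pvIsPref (href : String) : Bool :=
  pvPreferred.any (fun d => PySem.Str.isIn d href)

-- first loop of A: first valid link whose href contains a preferred domain
def pvFirstPref : List (List (String × String)) → Option String
  | [] => none
  | link :: rest =>
    let href := pvHref link
    if pvSkip href then pvFirstPref rest
    else if pvIsPref href then some href
    else pvFirstPref rest

-- second loop of A: first valid link ('href and not href.startswith("#")')
def pvFirstValid : List (List (String × String)) → Option String
  | [] => none
  | link :: rest =>
    let href := pvHref link
    if href != "" && !(PySem.Str.startswith href "#") then some href
    else pvFirstValid rest

def best_link_py (links : List (List (String × String))) (fallback_url : String) : String :=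
  match pvFirstPref links with
  | some h => h
  | none =>
    match pvFirstValid links with
    | some h => h
    | none => fallback_url

-- ===== PORT B =====
-- single pass, carrying the 'fallback' variable (none = Python None)
def pvAltLoop : List (List (String × String)) → Option String → String → String
  | [], fb?, fallback_url => fb?.getD fallback_url
  | link :: rest, fb?, fallback_url =>
    let href := pvHref link
    if pvSkip href then pvAltLoop rest fb? fallback_url
    else if pvIsPref href then href
    else pvAltLoop rest (if fb?.isNone then some href else fb?) fallback_url

def best_link_py_alt (links : List (List (String × String))) (fallback_url : String) : String :=
  pvAltLoop links none fallback_url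

-- ===== PRECONDITION & SPEC =====
def Spec_best_link_py (links : List (List (String × String))) (fallback_url : String) (out : String) : Prop := out = best_link_py_alt links fallback_url
instance (links : List (List (String × String))) (fallback_url : String) (out : String) : Decidable (Spec_best_link_py links fallback_url out) := by unfold Spec_best_link_py; infer_instance

-- ===== CLAIM (what is proved, stated in full; the proofs are below) =====
def Claim_equal_best_link_py : Prop := ∀ (links : List (List (String × String))) (fallback_url : String), Dom_best_link_py links fallback_url → Spec_best_link_py links fallback_url (best_link_py links fallback_url)

-- ===== LEMMAS AND PROOFS =====
-- the second loop's test is the negation of the first loop's skip test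
lemma pvValid_eq_not_skip (href : String) :
    (href != "" && !(PySem.Str.startswith href "#")) = !pvSkip href := by
  simp [pvSkip, bne]

-- loop invariant: one pass = first-preferred, else carried fallback, else first-valid
lemma pvAltLoop_eq (links : List (List (String × String))) :
    ∀ (fb? : Option String) (fbu : String),
    pvAltLoop links fb? fbu =
      match pvFirstPref links with
      | some h => h
      | none =>
        match fb? with
        | some f => f
        | none => (pvFirstValid links).getD fbu := by
  induction links with
  | nil => intro fb? fbu; cases fb? <;> simp [pvAltLoop, pvFirstPref, pvFirstValid]
  | cons link rest ih =>
    intro fb? fbu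
    simp only [pvAltLoop, pvFirstPref, pvFirstValid, pvValid_eq_not_skip]
    by_cases p1 : pvSkip (pvHref link) = true
    · simp [p1, ih]
    · by_cases p2 : pvIsPref (pvHref link) = true
      · simp [p1, p2]
      · cases fb? with
        | none => simp [p1, p2, ih]
        | some f => simp [p1, p2, ih]

-- ===== VERDICT (by name: the statement is the Claim_ definition above) =====
theorem best_link_py_spec : Claim_equal_best_link_py := by
  intro links fallback_url _
  unfold Spec_best_link_py best_link_py best_link_py_alt
  rw [pvAltLoop_eq]
  cases h : pvFirstPref links <;> cases h2 : pvFirstValid links <;> simp
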